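-- pv_equiv track=rewrite | github.com/mmanishh/codilitysolution | euclidean/num_chocs.py | chocolates_naive
-- ===== SOURCE A (Python) =====
-- def chocolates_naive(N,M):
--     count =0
--     A = list(range(N))
--     i = 0
--     while True:
--
--
--
--         if A[i] == -1:
--             return count
--         else:
--             A[i] = -1
--             count +=1
--             i = (i+M) % len(A)
-- ===== SOURCE B (Python) =====
-- def chocolates_naive(N, M):
--     # closed form: the walk visits exactly N // gcd(N, M) cells
--     a = N
--     b = M % N
--     while b:
--         a, b = b, a % b
--     return N // a
-- ===== Notes on version B (the rewrite author's own statement) =====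
-- stated objective: faster
-- what changed: A simulates the walk, marking one cell per step until it revisits one; B returns the closed form N // gcd(N, M % N) computed by Euclid's algorithm, with no list and no walk.
import Mathlib
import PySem

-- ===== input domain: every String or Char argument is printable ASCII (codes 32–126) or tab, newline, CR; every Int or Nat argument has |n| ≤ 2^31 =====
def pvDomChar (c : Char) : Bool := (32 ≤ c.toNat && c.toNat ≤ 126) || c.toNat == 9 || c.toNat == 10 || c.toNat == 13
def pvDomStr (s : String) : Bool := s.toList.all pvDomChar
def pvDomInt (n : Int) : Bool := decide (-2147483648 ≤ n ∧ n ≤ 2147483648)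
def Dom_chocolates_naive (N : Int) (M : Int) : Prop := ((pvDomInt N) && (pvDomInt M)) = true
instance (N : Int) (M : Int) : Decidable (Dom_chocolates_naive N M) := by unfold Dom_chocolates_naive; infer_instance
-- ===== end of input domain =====

-- B replaces A's cell-marking walk by the closed form N // gcd(N, M % N) via Euclid's algorithm.

-- ===== PORT A =====
-- the `while True` loop over the Python list, ported as an Array (Python's list has O(1)
-- indexing and assignment). `i` is never negative: it starts at 0 and stays a remainder
-- modulo the positive length, so Python's `A[i]` is exactly the in-bounds access guarded
-- here (when N ≤ 0 Python raises IndexError on `A[0]` — those inputs are outside Pre_).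
-- Each pass either returns `count` or marks one more cell, so at most N+1 passes happen:
-- the fuel N+1 is a totalization guard only, never exhausted when N ≥ 1.
def pvLoopA (M : Int) : Array Int → Int → Int → Nat → Int
  | _, _, count, 0 => count
  | A, i, count, fuel + 1 =>
    if i.toNat < A.size then
      if A.getD i.toNat 0 = -1 then count
      else
        -- `A[i] = -1` keeps len(A) unchanged, so `len(A)` is `A.size`
        pvLoopA M (A.setIfInBounds i.toNat (-1))
          (PySem.Int.mod (i + M) (A.size : Int)) (count + 1) fuel
    else count               -- IndexError (only outside Pre_)

def chocolates_naive (N : Int) (M : Int) : Int :=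
  pvLoopA M (PySem.List.pyRange 0 N 1).toArray 0 0 (N.toNat + 1)

-- ===== PORT B =====
-- `b = M % N` then `while b: a, b = b, a % b` then `return N // a`
def pvEuclid (a : Int) (b : Int) : Int :=
  if h : b = 0 then a else pvEuclid b (PySem.Int.mod a b)
termination_by b.natAbs
decreasing_by
  rcases lt_or_gt_of_ne h with hb | hb
  · have h1 := PySem.Int.mod_neg_bounds a hb
    omega
  · have h1 := PySem.Int.mod_nonneg a hb
    have h2 := PySem.Int.mod_lt a hb
    omega

def chocolates_naive_alt (N : Int) (M : Int) : Int :=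
  PySem.Int.floordiv N (pvEuclid N (PySem.Int.mod M N))

-- ===== PRECONDITION & SPEC =====
-- A raises IndexError (A[0] on the empty list) whenever N ≤ 0; Pre_ excludes exactly those inputs.
def Pre_chocolates_naive (N : Int) (M : Int) : Prop := 1 ≤ N
instance (N : Int) (M : Int) : Decidable (Pre_chocolates_naive N M) := by unfold Pre_chocolates_naive; infer_instance
def pvWitness_chocolates_naive : Int × Int := (10, 4)

def Spec_chocolates_naive (N : Int) (M : Int) (out : Int) : Prop := out = chocolates_naive_alt N M
instance (N : Int) (M : Int) (out : Int) : Decidable (Spec_chocolates_naive N M out) := by unfold Spec_chocolates_naive; infer_instance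

-- ===== CLAIM (what is proved, stated in full; the proofs are below) =====
def Claim_equal_chocolates_naive : Prop := ∀ (N : Int) (M : Int), Dom_chocolates_naive N M → Pre_chocolates_naive N M → Spec_chocolates_naive N M (chocolates_naive N M)

-- ===== LEMMAS AND PROOFS =====

-- B side: pvEuclid on natural inputs computes Nat.gcd
theorem pvEuclid_eq_gcd (b a : Nat) : pvEuclid (a : Int) (b : Int) = (Nat.gcd b a : Int) := by
  induction b using Nat.strong_induction_on generalizing a with
  | _ b ih =>
    rw [pvEuclid]
    rcases Nat.eq_zero_or_pos b with hb | hb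
    · simp [hb]
    · have hbz : (b : Int) ≠ 0 := by exact_mod_cast Nat.pos_iff_ne_zero.mp hb
      rw [dif_neg hbz, PySem.Int.mod_natCast]
      rw [ih (a % b) (Nat.mod_lt a hb)]
      congr 1
      exact (Nat.gcd_rec b a).symm

theorem alt_closed (N M : Int) (hN : 1 ≤ N) :
    chocolates_naive_alt N M = ((N.toNat / Nat.gcd N.toNat (PySem.Int.mod M N).toNat : Nat) : Int) := by
  have hNpos : (0:Int) < N := hN
  have hmn : 0 ≤ PySem.Int.mod M N := PySem.Int.mod_nonneg M hNpos
  have hN' : ((N.toNat : Nat) : Int) = N := Int.toNat_of_nonneg (le_of_lt hNpos)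
  have hm' : (((PySem.Int.mod M N).toNat : Nat) : Int) = PySem.Int.mod M N := Int.toNat_of_nonneg hmn
  have key : chocolates_naive_alt N M
      = PySem.Int.floordiv (N.toNat : Int) (pvEuclid (N.toNat : Int) (((PySem.Int.mod M N).toNat : Nat) : Int)) := by
    unfold chocolates_naive_alt
    rw [hN', hm']
  rw [key, pvEuclid_eq_gcd, PySem.Int.floordiv_natCast]
  congr 2
  exact Nat.gcd_comm _ _

-- A side: marking function — after t steps, cell j holds -1 iff some index s*m % n (s < t) hit it
def pvMark (m n t j : Nat) : Int :=
  if ∃ s, s < t ∧ (s * m) % n = j then -1 else (j : Int)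

def pvList (m n t : Nat) : List Int := (List.range n).map (pvMark m n t)

theorem pvList_length (m n t : Nat) : (pvList m n t).length = n := by
  simp [pvList]

-- a position repeats exactly at multiples of k = n / gcd n m
theorem repeat_iff (n m s t : Nat) (hn : 0 < n) (hs : s ≤ t) :
    ((t * m) % n = (s * m) % n) ↔ (n / Nat.gcd n m) ∣ (t - s) := by
  have hg : 0 < Nat.gcd n m := Nat.gcd_pos_of_pos_left m hn
  have hdvd_n : Nat.gcd n m ∣ n := Nat.gcd_dvd_left n m
  have hdvd_m : Nat.gcd n m ∣ m := Nat.gcd_dvd_right n m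
  have h1 : ((t * m) % n = (s * m) % n) ↔ n ∣ (t - s) * m := by
    rw [eq_comm, ← Nat.ModEq]
    rw [Nat.modEq_iff_dvd' (Nat.mul_le_mul_right m hs), Nat.sub_mul]
  rw [h1]
  set g := Nat.gcd n m with hgdef
  have hn' : g * (n / g) = n := Nat.mul_div_cancel' hdvd_n
  have hm' : g * (m / g) = m := Nat.mul_div_cancel' hdvd_m
  have hco : Nat.Coprime (n / g) (m / g) := Nat.coprime_div_gcd_div_gcd hg
  constructor
  · intro h
    have h2 : g * (n / g) ∣ (t - s) * (g * (m / g)) := by rw [hn', hm']; exact h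
    have h3 : (t - s) * (g * (m / g)) = g * ((t - s) * (m / g)) := by ring
    rw [h3] at h2
    have h4 : (n / g) ∣ (t - s) * (m / g) := (Nat.mul_dvd_mul_iff_left hg).mp h2
    exact hco.dvd_of_dvd_mul_right h4
  · rintro ⟨c, hc⟩
    refine ⟨c * (m / g), Nat.eq_of_mul_eq_mul_left hg ?_⟩
    calc g * ((t - s) * m) = (g * (n / g)) * c * m := by rw [hc]; ring
    _ = n * c * m := by rw [hn']
    _ = n * c * (g * (m / g)) := by rw [hm']
    _ = g * (n * (c * (m / g))) := by ring

-- no earlier step hits position t*m % n while t < k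
theorem mark_fresh (n m t : Nat) (hn : 0 < n) (ht : t < n / Nat.gcd n m) :
    pvMark m n t ((t * m) % n) = (((t * m) % n : Nat) : Int) := by
  unfold pvMark
  rw [if_neg]
  rintro ⟨s, hst, hhit⟩
  have h := (repeat_iff n m s t hn (le_of_lt hst)).mp hhit.symm
  have h2 := Nat.le_of_dvd (by omega) h
  omega

-- marking cell t*m % n turns the step-t list into the step-(t+1) list
theorem set_mark (n m t : Nat) (hn : 0 < n) :
    (pvList m n t).set ((t * m) % n) (-1) = pvList m n (t + 1) := by
  apply List.ext_getElem
  · simp [pvList]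
  · intro j h1 h2
    have hj : j < n := by simpa [pvList] using h2
    rw [List.getElem_set]
    simp only [pvList, List.getElem_map, List.getElem_range]
    by_cases hje : (t * m) % n = j
    · rw [if_pos hje]
      unfold pvMark
      rw [if_pos ⟨t, Nat.lt_succ_self t, hje⟩]
    · rw [if_neg hje]
      unfold pvMark
      by_cases hex : ∃ s, s < t ∧ (s * m) % n = j
      · rcases hex with ⟨s, hs1, hs2⟩
        rw [if_pos ⟨s, hs1, hs2⟩, if_pos ⟨s, Nat.lt_succ_of_lt hs1, hs2⟩]
      · rw [if_neg hex, if_neg]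
        rintro ⟨s, hs1, hs2⟩
        rcases Nat.lt_succ_iff_lt_or_eq.mp hs1 with h | h
        · exact hex ⟨s, h, hs2⟩
        · exact hje (h ▸ hs2)

-- the index update of the loop
theorem step_index (n m t : Nat) (M : Int) (hn : 0 < n) (hm : m < n)
    (hM : PySem.Int.mod M (n : Int) = (m : Int)) :
    PySem.Int.mod ((((t * m) % n : Nat) : Int) + M) (n : Int) = ((((t + 1) * m) % n : Nat) : Int) := by
  have hnpos : (0:Int) < (n:Int) := by exact_mod_cast hn
  rw [PySem.Int.mod_eq_emod_of_pos hnpos] at hM ⊢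
  have hmm : (m:Int) % (n:Int) = (m:Int) :=
    Int.emod_eq_of_lt (by positivity) (by exact_mod_cast hm)
  have h1 : ((((t * m) % n : Nat) : Int) + M) % (n:Int)
      = ((((t * m) % n : Nat) : Int) + (m:Int)) % (n:Int) := by
    rw [Int.add_emod, hM]
    conv_rhs => rw [Int.add_emod, hmm]
  rw [h1]
  have h2 : ((((t * m) % n + m) % n : Nat) : Int)
      = ((((t * m) % n : Nat) : Int) + (m:Int)) % (n:Int) := by
    push_cast
    rfl
  rw [← h2]
  congr 1
  rw [Nat.mod_add_mod, Nat.succ_mul]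

-- k * m ≡ 0 (mod n): the walk returns to cell 0 at step k
theorem back_to_zero (n m : Nat) (hn : 0 < n) : ((n / Nat.gcd n m) * m) % n = 0 := by
  have hg : 0 < Nat.gcd n m := Nat.gcd_pos_of_pos_left m hn
  have hn' : Nat.gcd n m * (n / Nat.gcd n m) = n := Nat.mul_div_cancel' (Nat.gcd_dvd_left n m)
  have hm' : Nat.gcd n m * (m / Nat.gcd n m) = m := Nat.mul_div_cancel' (Nat.gcd_dvd_right n m)
  have hdvd : n ∣ (n / Nat.gcd n m) * m := by
    refine ⟨m / Nat.gcd n m, Nat.eq_of_mul_eq_mul_left hg ?_⟩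
    calc Nat.gcd n m * ((n / Nat.gcd n m) * m)
        = (Nat.gcd n m * (n / Nat.gcd n m)) * m := by ring
      _ = n * m := by rw [hn']
      _ = n * (Nat.gcd n m * (m / Nat.gcd n m)) := by rw [hm']
      _ = Nat.gcd n m * (n * (m / Nat.gcd n m)) := by ring
  obtain ⟨c, hc⟩ := hdvd
  rw [hc]
  exact Nat.mul_mod_right n c

theorem pvLoopA_stop (M : Int) (A : Array Int) (j : Nat) (count : Int) (f : Nat)
    (hj : j < A.size) (hv : A.getD j 0 = -1) :
    pvLoopA M A ((j : Nat) : Int) count (f + 1) = count := by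
  have hv' : A[j] = -1 := by rw [Array.getElem_eq_getD 0]; exact hv
  rw [pvLoopA]
  simp [Int.toNat_natCast, hj, hv]

theorem pvLoopA_step (M : Int) (A : Array Int) (j : Nat) (count : Int) (f : Nat)
    (hj : j < A.size) (hv : A.getD j 0 ≠ -1) :
    pvLoopA M A ((j : Nat) : Int) count (f + 1)
      = pvLoopA M (A.setIfInBounds j (-1))
          (PySem.Int.mod (((j : Nat) : Int) + M) (A.size : Int)) (count + 1) f := by
  have hv' : A[j] ≠ -1 := by rw [Array.getElem_eq_getD 0]; exact hv
  rw [pvLoopA]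
  simp [Int.toNat_natCast, hj, hv']

theorem pvList_size (m n t : Nat) : (pvList m n t).toArray.size = n := by
  rw [List.size_toArray, pvList_length]

theorem pvList_get (m n t j : Nat) (hj : j < n) :
    (pvList m n t).toArray.getD j 0 = pvMark m n t j := by
  have hj' : j < (pvList m n t).toArray.size := by rw [pvList_size]; exact hj
  rw [← Array.getElem_eq_getD (h := hj'), List.getElem_toArray]
  simp [pvList]

theorem set_mark_arr (n m t : Nat) (hn : 0 < n) :
    (pvList m n t).toArray.setIfInBounds ((t * m) % n) (-1) = (pvList m n (t + 1)).toArray := by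
  have hj' : (t * m) % n < (pvList m n t).toArray.size := by
    rw [pvList_size]; exact Nat.mod_lt _ hn
  rw [Array.setIfInBounds, dif_pos hj', List.set_toArray]
  exact congrArg List.toArray (set_mark n m t hn)

-- main loop invariant: from state t ≤ k the loop returns k
theorem loop_invariant (n m : Nat) (M : Int) (hn : 0 < n) (hm : m < n)
    (hM : PySem.Int.mod M (n : Int) = (m : Int)) :
    ∀ d t, t ≤ n / Nat.gcd n m → n / Nat.gcd n m - t = d →
      pvLoopA M (pvList m n t).toArray (((t * m) % n : Nat) : Int) (t : Int) (n + 1 - t) =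
        ((n / Nat.gcd n m : Nat) : Int) := by
  set g := Nat.gcd n m with hgdef
  have hg : 0 < g := Nat.gcd_pos_of_pos_left m hn
  set k := n / g with hkdef
  have hk_le : k ≤ n := Nat.div_le_self n g
  have hk_pos : 0 < k := Nat.div_pos (Nat.le_of_dvd hn (Nat.gcd_dvd_left n m)) hg
  intro d
  induction d with
  | zero =>
    intro t hle hdt
    have ht : t = k := by omega
    subst ht
    have hi : (k * m) % n = 0 := back_to_zero n m hn
    obtain ⟨f, hf⟩ : ∃ f, n + 1 - k = f + 1 := ⟨n - k, by omega⟩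
    have hmarked : pvMark m n k ((k * m) % n) = -1 := by
      unfold pvMark
      rw [if_pos ⟨0, hk_pos, by simpa using hi.symm⟩]
    rw [hf]
    exact pvLoopA_stop M _ _ _ f (by rw [pvList_size]; omega)
      (by rw [pvList_get m n k _ (by omega)]; exact hmarked)
  | succ d ih =>
    intro t hle hdt
    have htk : t < k := by omega
    have hjlt : (t * m) % n < n := Nat.mod_lt _ hn
    obtain ⟨f, hf⟩ : ∃ f, n + 1 - t = f + 1 := ⟨n - t, by omega⟩
    have hv : pvMark m n t ((t * m) % n) ≠ -1 := by
      rw [mark_fresh n m t hn htk]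
      have := Int.natCast_nonneg ((t * m) % n)
      omega
    rw [hf, pvLoopA_step M _ _ _ f (by rw [pvList_size]; exact hjlt)
      (by rw [pvList_get m n t _ hjlt]; exact hv)]
    rw [set_mark_arr n m t hn, pvList_size, step_index n m t M hn hm hM]
    have hc : (t : Int) + 1 = ((t + 1 : Nat) : Int) := by push_cast; ring
    rw [hc]
    have hfeq : f = n + 1 - (t + 1) := by omega
    rw [hfeq]
    exact ih (t + 1) (by omega) (by omega)

theorem pyRange_is_list0 (n m : Nat) : PySem.List.pyRange 0 (n : Int) 1 = pvList m n 0 := by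
  rw [PySem.List.pyRange_zero_nat]
  unfold pvList
  apply List.map_congr_left
  intro j _
  simp [pvMark]

theorem chocolates_naive_spec : Claim_equal_chocolates_naive := by
  intro N M _ hPre
  unfold Spec_chocolates_naive
  have hNpos : (0 : Int) < N := hPre
  have hmod_nonneg := PySem.Int.mod_nonneg M hNpos
  have hmod_lt := PySem.Int.mod_lt M hNpos
  have hn0 : 0 < N.toNat := by omega
  have hNcast : ((N.toNat : Nat) : Int) = N := Int.toNat_of_nonneg (by omega)
  have hmcast : (((PySem.Int.mod M N).toNat : Nat) : Int) = PySem.Int.mod M N :=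
    Int.toNat_of_nonneg hmod_nonneg
  have hm : (PySem.Int.mod M N).toNat < N.toNat := by omega
  set n := N.toNat with hndef
  set m := (PySem.Int.mod M N).toNat with hmdef
  have hM : PySem.Int.mod M (n : Int) = (m : Int) := by rw [hNcast, hmcast]
  rw [alt_closed N M hPre]
  unfold chocolates_naive
  have hr : (PySem.List.pyRange 0 N 1).toArray = (pvList m n 0).toArray := by
    rw [← hNcast]
    exact congrArg List.toArray (pyRange_is_list0 n m)
  rw [hr]
  have := loop_invariant n m M hn0 hm hM (n / Nat.gcd n m) 0 (Nat.zero_le _) (Nat.sub_zero _)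
  simpa only [Nat.zero_mul, Nat.zero_mod, Nat.cast_zero, Nat.sub_zero] using this
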